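-- pv_equiv track=rewrite | github.com/FerNaNdoNesi/SAS | 02 - Ataque com texto em claro/transposicao.py | monta_matriz_Normal
-- ===== SOURCE A (Python) =====
-- import math
--
-- def monta_matriz_Normal(conteudo, key):
-- 	count = 0
-- 	tamanho = len(conteudo)
-- 	linha = int(math.ceil(float(tamanho)/float(key)))
-- 	coluna = key
--
-- 	# Criando matriz
-- 	matriz = []
-- 	for l in range(linha):
-- 		linha = []
-- 		for c in range(coluna):
-- 			if(count > (len(conteudo)-1)):
-- 				campo = ' '
-- 				linha = linha + [campo]
-- 			else:
-- 				campo = conteudo[count]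
-- 				linha = linha + [campo]
-- 			count += 1
--
-- 		matriz = matriz + [linha]
-- 	return matriz
-- ===== SOURCE B (Python) =====
-- import math
--
-- def monta_matriz_Normal(conteudo, key):
--     linha = int(math.ceil(float(len(conteudo)) / float(key)))
--     coluna = key
--     matriz = []
--     for r in range(linha):
--         row = list(conteudo[r * coluna:(r + 1) * coluna])
--         row += [' '] * (coluna - len(row))
--         matriz.append(row)
--     return matriz
-- ===== Notes on version B (the rewrite author's own statement) =====
-- stated objective: simpler
-- what changed: B builds each row at once by slicing conteudo row-wise and tail-padding with spaces, removing A's global cell counter, the per-cell bounds branch, and A's quadratic 'list + [x]' concatenation.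
import Mathlib
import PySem

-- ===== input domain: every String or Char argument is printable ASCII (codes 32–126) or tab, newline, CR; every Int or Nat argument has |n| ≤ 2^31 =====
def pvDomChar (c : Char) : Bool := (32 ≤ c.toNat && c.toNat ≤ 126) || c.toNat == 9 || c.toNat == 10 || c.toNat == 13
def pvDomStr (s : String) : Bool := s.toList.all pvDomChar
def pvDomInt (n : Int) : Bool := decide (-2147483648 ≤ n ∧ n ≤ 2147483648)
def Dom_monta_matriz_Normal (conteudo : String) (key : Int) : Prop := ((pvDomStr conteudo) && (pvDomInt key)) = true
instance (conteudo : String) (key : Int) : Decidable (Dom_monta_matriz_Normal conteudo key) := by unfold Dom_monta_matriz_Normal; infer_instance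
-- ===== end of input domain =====

-- B builds each row at once by slicing the content row-wise and tail-padding with spaces,
-- removing A's global cell counter, the per-cell bounds branch and the quadratic per-cell
-- list concatenation (objective: simpler; a timing run measured B faster).

-- ===== PORT A =====
-- int(math.ceil(float(t)/float(k))): exact integer ceiling; float arithmetic is exact for
-- these magnitudes (|t|,|k| ≤ 2^31, well below 2^53), so ceil(t/k) = -((-t) // k).
def pvCeilDiv (t k : Int) : Int := -(PySem.Int.floordiv (-t) k)

def monta_matriz_Normal (conteudo : String) (key : Int) : List (List String) :=
  let cs := conteudo.toList
  let tamanho : Int := cs.length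
  let linha := pvCeilDiv tamanho key
  let coluna := key
  let res :=
    (PySem.List.pyRange 0 linha 1).foldl
      (fun (st : Int × List (List String)) (_ : Int) =>
        let inner :=
          (PySem.List.pyRange 0 coluna 1).foldl
            (fun (st2 : Int × List String) (_ : Int) =>
              if st2.1 > tamanho - 1 then
                (st2.1 + 1, st2.2 ++ [" "])
              else
                (st2.1 + 1, st2.2 ++ [String.ofList [PySem.List.pyGetD cs st2.1 ' ']]))
            (st.1, [])
        (inner.1, st.2 ++ [inner.2]))
      (0, [])
  res.2

-- ===== PORT B =====
def monta_matriz_Normal_alt (conteudo : String) (key : Int) : List (List String) :=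
  let cs := conteudo.toList
  let linha := pvCeilDiv (cs.length : Int) key
  let coluna := key
  (PySem.List.pyRange 0 linha 1).map (fun r =>
    let row := (PySem.List.slice cs (some (r * coluna)) (some ((r + 1) * coluna))).map
      (fun c => String.ofList [c])
    row ++ List.replicate (coluna.toNat - row.length) " ")

-- ===== PRECONDITION & SPEC =====
-- A raises ZeroDivisionError when key = 0 (float(tamanho)/float(key)); excluded.
def Pre_monta_matriz_Normal (conteudo : String) (key : Int) : Prop := key ≠ 0
instance (conteudo : String) (key : Int) : Decidable (Pre_monta_matriz_Normal conteudo key) := by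
  unfold Pre_monta_matriz_Normal; infer_instance

def pvWitness_monta_matriz_Normal : String × Int := ("abcde", 2)

def Spec_monta_matriz_Normal (conteudo : String) (key : Int) (out : List (List String)) : Prop :=
  out = monta_matriz_Normal_alt conteudo key
instance (conteudo : String) (key : Int) (out : List (List String)) :
    Decidable (Spec_monta_matriz_Normal conteudo key out) := by
  unfold Spec_monta_matriz_Normal; infer_instance

-- ===== CLAIM (what is proved, stated in full; the proofs are below) =====
def Claim_equal_monta_matriz_Normal : Prop :=
  ∀ (conteudo : String) (key : Int), Dom_monta_matriz_Normal conteudo key →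
    Pre_monta_matriz_Normal conteudo key →
    Spec_monta_matriz_Normal conteudo key (monta_matriz_Normal conteudo key)

-- ===== LEMMAS AND PROOFS =====

-- one cell of the matrix as a function of its flat index
def pvCell (cs : List Char) (j : Int) : String :=
  if j > (cs.length : Int) - 1 then " " else String.ofList [PySem.List.pyGetD cs j ' ']

theorem pv_inner (cs : List Char) (n : Nat) (c0 : Int) (acc : List String) :
    (List.range n).foldl
      (fun (st2 : Int × List String) (_ : Nat) =>
        if st2.1 > (cs.length : Int) - 1 then
          (st2.1 + 1, st2.2 ++ [" "])
        else
          (st2.1 + 1, st2.2 ++ [String.ofList [PySem.List.pyGetD cs st2.1 ' ']]))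
      (c0, acc)
    = (c0 + n, acc ++ (List.range n).map (fun i : Nat => pvCell cs (c0 + (i : Int)))) := by
  induction n generalizing acc c0 with
  | zero => simp
  | succ m ih =>
    rw [List.range_succ, List.foldl_append, ih, List.foldl_cons, List.foldl_nil,
      List.map_append, List.map_cons, List.map_nil]
    simp only [pvCell]
    split_ifs with h <;> (rw [List.append_assoc]; congr 1; push_cast; ring)

theorem pv_outer (cs : List Char) (k : Nat) (m : Nat) (acc : List (List String)) (c0 : Int) :
    (List.range m).foldl
      (fun (st : Int × List (List String)) (_ : Nat) =>
        let inner :=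
          (List.range k).foldl
            (fun (st2 : Int × List String) (_ : Nat) =>
              if st2.1 > (cs.length : Int) - 1 then
                (st2.1 + 1, st2.2 ++ [" "])
              else
                (st2.1 + 1, st2.2 ++ [String.ofList [PySem.List.pyGetD cs st2.1 ' ']]))
            (st.1, [])
        (inner.1, st.2 ++ [inner.2]))
      (c0, acc)
    = (c0 + m * k,
       acc ++ (List.range m).map (fun r : Nat =>
         (List.range k).map (fun i : Nat => pvCell cs (c0 + (r : Int) * (k : Int) + (i : Int))))) := by
  induction m generalizing acc c0 with
  | zero => simp
  | succ m ih =>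
    rw [List.range_succ, List.foldl_append, ih, List.foldl_cons, List.foldl_nil]
    dsimp only
    rw [pv_inner]
    simp only [Prod.mk.injEq, List.nil_append, List.map_append, List.map_cons, List.map_nil]
    constructor
    · push_cast; ring
    · rw [List.append_assoc]

-- B's row equals the cell-by-cell row
theorem pv_row (cs : List Char) (k : Nat) (a : Nat) :
    (((cs.drop a).take k).map (fun c => String.ofList [c])) ++
      List.replicate (k - (((cs.drop a).take k).map (fun c => String.ofList [c])).length) " "
    = (List.range k).map (fun i : Nat => pvCell cs ((a : Int) + (i : Int))) := by
  apply List.ext_getElem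
  · simp
  · intro i h1 h2
    simp only [List.length_map, List.length_range] at h2
    by_cases hlt : a + i < cs.length
    · have htake : i < (((cs.drop a).take k)).length := by simp; omega
      rw [List.getElem_append_left (by simpa using htake)]
      rw [List.getElem_map, List.getElem_take, List.getElem_drop]
      rw [List.getElem_map, List.getElem_range]
      simp only [pvCell]
      rw [if_neg (by push_cast; omega)]
      rw [PySem.List.pyGetD_eq_getElem cs ' ' (by positivity) (by push_cast; omega)]
      congr 2
    · have htake : (((cs.drop a).take k)).length ≤ i := by simp; omega
      rw [List.getElem_append_right (by simpa using htake)]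
      simp only [List.getElem_replicate]
      rw [List.getElem_map, List.getElem_range]
      simp only [pvCell]
      rw [if_pos (by push_cast; omega)]

-- ===== VERDICT (by name: the statement is the Claim_ definition above) =====
theorem monta_matriz_Normal_spec : Claim_equal_monta_matriz_Normal := by
  intro conteudo key _ hk
  unfold Spec_monta_matriz_Normal
  simp only [monta_matriz_Normal, monta_matriz_Normal_alt]
  rcases lt_trichotomy key 0 with hneg | hzero | hpos
  · -- key < 0 : linha ≤ 0, both sides are []
    have hLle : pvCeilDiv (conteudo.toList.length : Int) key ≤ 0 := by
      have h1 : PySem.Int.floordiv (-(conteudo.toList.length : Int)) key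
          = PySem.Int.floordiv (conteudo.toList.length : Int) (-key) := by
        have := PySem.Int.floordiv_neg_neg (conteudo.toList.length : Int) (-key)
        simpa using this
      have h2 : 0 ≤ PySem.Int.floordiv (conteudo.toList.length : Int) (-key) := by
        rw [PySem.Int.floordiv_eq_ediv_of_pos (by omega)]
        exact Int.ediv_nonneg (by positivity) (by omega)
      simp only [pvCeilDiv, h1]
      omega
    rw [PySem.List.pyRange_one_eq_nil hLle]
    simp
  · exact absurd hzero hk
  · -- key > 0
    have hkey : key = ((key.toNat : Nat) : Int) := (Int.toNat_of_nonneg hpos.le).symm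
    simp only [PySem.List.pyRange_one, Int.sub_zero, List.foldl_map, List.map_map, zero_add]
    rw [pv_outer]
    simp only [zero_add, List.nil_append, Function.comp_def]
    refine List.map_congr_left ?_
    intro r _
    have hcast : ((r : Int)) * key = (((r * key.toNat : Nat)) : Int) := by
      push_cast [Int.toNat_of_nonneg hpos.le]; ring
    have hcast2 : ((r : Int) + 1) * key = (((r * key.toNat + key.toNat : Nat)) : Int) := by
      push_cast [Int.toNat_of_nonneg hpos.le]; ring
    rw [hcast, hcast2, PySem.List.slice_natCast]
    have hsub : r * key.toNat + key.toNat - r * key.toNat = key.toNat := by omega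
    rw [hsub]
    have hidx : ∀ i : Nat, ((r : Int)) * ((key.toNat : Nat) : Int) + (i : Int)
        = (((r * key.toNat : Nat)) : Int) + (i : Int) := by intro i; push_cast; ring
    simp only [hidx]
    rw [← pv_row]
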